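-- pv_equiv track=rewrite | github.com/potable-anarchy/blog | generate_blog_content.py | format_content_as_html
-- ===== SOURCE A (Python) =====
-- def format_content_as_html(content: str) -> str:
--     """Convert plain text content to HTML format"""
--     lines = content.split('\n')
--     html_lines = []
--     in_list = False
--
--     for line in lines:
--         line = line.strip()
--         if not line:
--             if in_list:
--                 html_lines.append('</ul>')
--                 in_list = False
--             continue
--
--         # Headers
--         if line.startswith('## '):
--             if in_list:
--                 html_lines.append('</ul>')
--                 in_list = False
--             html_lines.append(f'<h2>{line[3:]}</h2>')
--         elif line.startswith('# '):
--             if in_list: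
--                 html_lines.append('</ul>')
--                 in_list = False
--             html_lines.append(f'<h1>{line[2:]}</h1>')
--         # List items
--         elif line.startswith('- '):
--             if not in_list:
--                 html_lines.append('<ul>')
--                 in_list = True
--             html_lines.append(f'    <li>{line[2:]}</li>')
--         # Regular paragraphs
--         else:
--             if in_list:
--                 html_lines.append('</ul>')
--                 in_list = False
--             html_lines.append(f'<p>{line}</p>')
--
--     if in_list:
--         html_lines.append('</ul>')
--
--     # Add proper indentation
--     return '                ' + '\n\n                '.join(html_lines)
-- ===== SOURCE B (Python) =====
-- from itertools import groupby
--
--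
-- def format_content_as_html(content: str) -> str:
--     """Convert plain text content to HTML format"""
--     def classify(raw):
--         line = raw.strip()
--         if not line:
--             return ('blank', '')
--         if line.startswith('## '):
--             return ('h2', line[3:])
--         if line.startswith('# '):
--             return ('h1', line[2:])
--         if line.startswith('- '):
--             return ('li', line[2:])
--         return ('p', line)
--
--     out = []
--     for kind, group in groupby(map(classify, content.split('\n')), key=lambda t: t[0]):
--         texts = [t for _, t in group]
--         if kind == 'li':
--             out.append('<ul>')
--             out.extend(f'    <li>{t}</li>' for t in texts)
--             out.append('</ul>')
--         elif kind != 'blank':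
--             out.extend(f'<{kind}>{t}</{kind}>' for t in texts)
--     return '                ' + '\n\n                '.join(out)
-- ===== Notes on version B (the rewrite author's own statement) =====
-- stated objective: simpler
-- what changed: Replaces A's single pass with a mutable in_list flag by a two-phase pipeline: classify every stripped line into a (kind, text) token, then an itertools.groupby pass emits each run of list items as one <ul>...</ul> group and other kinds directly.
import Mathlib
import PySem

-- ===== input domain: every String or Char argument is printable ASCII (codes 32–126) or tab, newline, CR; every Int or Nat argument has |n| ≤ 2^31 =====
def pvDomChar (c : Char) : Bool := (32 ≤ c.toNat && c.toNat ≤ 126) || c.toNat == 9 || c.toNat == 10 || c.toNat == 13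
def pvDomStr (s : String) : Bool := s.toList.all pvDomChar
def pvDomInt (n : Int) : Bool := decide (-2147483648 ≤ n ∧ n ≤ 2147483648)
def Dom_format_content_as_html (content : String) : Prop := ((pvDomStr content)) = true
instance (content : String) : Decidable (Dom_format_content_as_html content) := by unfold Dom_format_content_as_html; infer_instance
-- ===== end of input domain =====

-- B replaces A's running in_list flag with a two-phase classify-then-group pass (simpler decomposition); same output.

-- ===== PORT A =====
-- content.split('\n') (sep nonempty, so split? is always some)
def pvSplitLines (s : String) : List String := (PySem.Str.split? s "\n").getD []

-- the loop body of A's for-loop: state = (html_lines, in_list)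
def pvStepA (st : List String × Bool) (l : String) : List String × Bool :=
  let html := st.1
  let inList := st.2
  let line := PySem.Str.strip l
  if line = "" then
    if inList then (html ++ ["</ul>"], false) else (html, inList)
  else if PySem.Str.startswith line "## " then
    ((if inList then html ++ ["</ul>"] else html) ++ ["<h2>" ++ PySem.Str.slice line (some 3) none ++ "</h2>"], false)
  else if PySem.Str.startswith line "# " then
    ((if inList then html ++ ["</ul>"] else html) ++ ["<h1>" ++ PySem.Str.slice line (some 2) none ++ "</h1>"], false)
  else if PySem.Str.startswith line "- " then
    ((if inList then html else html ++ ["<ul>"]) ++ ["    <li>" ++ PySem.Str.slice line (some 2) none ++ "</li>"], true)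
  else
    ((if inList then html ++ ["</ul>"] else html) ++ ["<p>" ++ line ++ "</p>"], false)

def format_content_as_html (content : String) : String :=
  let lines := pvSplitLines content
  let st := lines.foldl pvStepA ([], false)
  let html := if st.2 then st.1 ++ ["</ul>"] else st.1
  "                " ++ PySem.Str.join "\n\n                " html

-- ===== PORT B =====
inductive PvKind : Type
  | h1 | h2 | li | p | blank
deriving DecidableEq, Repr

-- B's classify helper
def pvClassify (raw : String) : PvKind × String :=
  let line := PySem.Str.strip raw
  if line = "" then (PvKind.blank, "")
  else if PySem.Str.startswith line "## " then (PvKind.h2, PySem.Str.slice line (some 3) none)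
  else if PySem.Str.startswith line "# " then (PvKind.h1, PySem.Str.slice line (some 2) none)
  else if PySem.Str.startswith line "- " then (PvKind.li, PySem.Str.slice line (some 2) none)
  else (PvKind.p, line)

def pvLiTag (t : String) : String := "    <li>" ++ t ++ "</li>"

def pvTag (k : PvKind) (t : String) : String :=
  match k with
  | PvKind.h2 => "<h2>" ++ t ++ "</h2>"
  | PvKind.h1 => "<h1>" ++ t ++ "</h1>"
  | _ => "<p>" ++ t ++ "</p>"

-- B's groupby loop: take each maximal run of equal kinds and emit its tags
def pvProcess : List (PvKind × String) → List String
  | [] => []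
  | (k, t) :: rest =>
    let run := rest.takeWhile (fun q => decide (q.1 = k))
    let rest' := rest.dropWhile (fun q => decide (q.1 = k))
    let texts := t :: run.map (·.2)
    (if k = PvKind.li then "<ul>" :: texts.map pvLiTag ++ ["</ul>"]
     else if k = PvKind.blank then []
     else texts.map (pvTag k)) ++ pvProcess rest'
termination_by ks => ks.length
decreasing_by
  simp only [List.length_cons]
  exact Nat.lt_succ_of_le (List.length_dropWhile_le _ _)

def format_content_as_html_alt (content : String) : String :=
  "                " ++ PySem.Str.join "\n\n                "
    (pvProcess ((pvSplitLines content).map pvClassify))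

-- ===== PRECONDITION & SPEC =====
def Spec_format_content_as_html (content : String) (out : String) : Prop := out = format_content_as_html_alt content
instance (content : String) (out : String) : Decidable (Spec_format_content_as_html content out) := by unfold Spec_format_content_as_html; infer_instance

-- ===== CLAIM (what is proved, stated in full; the proofs are below) =====
def Claim_equal_format_content_as_html : Prop := ∀ (content : String), Dom_format_content_as_html content → Spec_format_content_as_html content (format_content_as_html content)

-- ===== LEMMAS AND PROOFS =====

-- A's loop rephrased as forward recursion carrying only the in_list flag (closing tag folded in)
def pvGA : Bool → List String → List String
  | inl, [] => if inl then ["</ul>"] else []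
  | inl, l :: ls =>
    let line := PySem.Str.strip l
    if line = "" then
      (if inl then ["</ul>"] else []) ++ pvGA false ls
    else if PySem.Str.startswith line "## " then
      (if inl then ["</ul>"] else []) ++ ["<h2>" ++ PySem.Str.slice line (some 3) none ++ "</h2>"] ++ pvGA false ls
    else if PySem.Str.startswith line "# " then
      (if inl then ["</ul>"] else []) ++ ["<h1>" ++ PySem.Str.slice line (some 2) none ++ "</h1>"] ++ pvGA false ls
    else if PySem.Str.startswith line "- " then
      (if inl then [] else ["<ul>"]) ++ ["    <li>" ++ PySem.Str.slice line (some 2) none ++ "</li>"] ++ pvGA true ls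
    else
      (if inl then ["</ul>"] else []) ++ ["<p>" ++ line ++ "</p>"] ++ pvGA false ls

theorem pvFoldA (ls : List String) : ∀ (acc : List String) (inl : Bool),
    (if (ls.foldl pvStepA (acc, inl)).2 = true then (ls.foldl pvStepA (acc, inl)).1 ++ ["</ul>"]
      else (ls.foldl pvStepA (acc, inl)).1)
      = acc ++ pvGA inl ls := by
  induction ls with
  | nil =>
    intro acc inl
    cases inl <;> simp [pvGA]
  | cons l ls ih =>
    intro acc inl
    by_cases h1 : PySem.Str.strip l = ""
    · have e : pvStepA (acc, inl) l = (if inl then acc ++ ["</ul>"] else acc, false) := by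
        cases inl <;> simp [pvStepA, h1]
      rw [List.foldl_cons, e, ih]
      cases inl <;> simp [pvGA, h1]
    · by_cases h2 : PySem.Str.startswith (PySem.Str.strip l) "## " = true
      · have e : pvStepA (acc, inl) l =
            ((if inl then acc ++ ["</ul>"] else acc)
              ++ ["<h2>" ++ PySem.Str.slice (PySem.Str.strip l) (some 3) none ++ "</h2>"], false) := by
          simp at h2
          cases inl <;> simp [pvStepA, h1, h2]
        rw [List.foldl_cons, e, ih]
        simp at h2
        cases inl <;> simp [pvGA, h1, h2]
      · by_cases h3 : PySem.Str.startswith (PySem.Str.strip l) "# " = true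
        · have e : pvStepA (acc, inl) l =
              ((if inl then acc ++ ["</ul>"] else acc)
                ++ ["<h1>" ++ PySem.Str.slice (PySem.Str.strip l) (some 2) none ++ "</h1>"], false) := by
            simp at h2 h3
            cases inl <;> simp [pvStepA, h1, h2, h3]
          rw [List.foldl_cons, e, ih]
          simp at h2 h3
          cases inl <;> simp [pvGA, h1, h2, h3]
        · by_cases h4 : PySem.Str.startswith (PySem.Str.strip l) "- " = true
          · have e : pvStepA (acc, inl) l =
                ((if inl then acc else acc ++ ["<ul>"])
                  ++ ["    <li>" ++ PySem.Str.slice (PySem.Str.strip l) (some 2) none ++ "</li>"], true) := by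
              simp at h2 h3 h4
              cases inl <;> simp [pvStepA, h1, h2, h3, h4]
            rw [List.foldl_cons, e, ih]
            simp at h2 h3 h4
            cases inl <;> simp [pvGA, h1, h2, h3, h4]
          · have e : pvStepA (acc, inl) l =
                ((if inl then acc ++ ["</ul>"] else acc)
                  ++ ["<p>" ++ PySem.Str.strip l ++ "</p>"], false) := by
              simp at h2 h3 h4
              cases inl <;> simp [pvStepA, h1, h2, h3, h4]
            rw [List.foldl_cons, e, ih]
            simp at h2 h3 h4
            cases inl <;> simp [pvGA, h1, h2, h3, h4]

-- continuation of B's grouping while inside an open <ul>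
def pvLiC : List (PvKind × String) → List String
  | [] => ["</ul>"]
  | (k, t) :: ks =>
    if k = PvKind.li then pvLiTag t :: pvLiC ks
    else "</ul>" :: pvProcess ((k, t) :: ks)

theorem pvLiC_eq (ks : List (PvKind × String)) :
    pvLiC ks = (ks.takeWhile (fun q => decide (q.1 = PvKind.li))).map (fun q => pvLiTag q.2)
      ++ "</ul>" :: pvProcess (ks.dropWhile (fun q => decide (q.1 = PvKind.li))) := by
  induction ks with
  | nil => simp [pvLiC, pvProcess]
  | cons q ks ih =>
    obtain ⟨k, t⟩ := q
    by_cases h : k = PvKind.li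
    · subst h
      simp [pvLiC, ih]
    · simp [pvLiC, h]

theorem pvProcess_li (t : String) (ks : List (PvKind × String)) :
    pvProcess ((PvKind.li, t) :: ks) = "<ul>" :: pvLiTag t :: pvLiC ks := by
  rw [pvProcess, pvLiC_eq]
  simp

theorem pvProcess_nonli (k : PvKind) (hk : k ≠ PvKind.li) (t : String) (ks : List (PvKind × String)) :
    pvProcess ((k, t) :: ks) = (if k = PvKind.blank then [] else [pvTag k t]) ++ pvProcess ks := by
  cases ks with
  | nil => rw [pvProcess]; simp [hk, pvProcess]
  | cons q ks' =>
    obtain ⟨k', t'⟩ := q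
    by_cases h : k' = k
    · subst h
      rw [pvProcess, pvProcess]
      simp [hk]
      split_ifs <;> simp
    · rw [pvProcess]
      simp [h, hk]

theorem pvMain (ls : List String) :
    pvGA false ls = pvProcess (ls.map pvClassify)
      ∧ pvGA true ls = pvLiC (ls.map pvClassify) := by
  induction ls with
  | nil => constructor <;> simp [pvGA, pvProcess, pvLiC]
  | cons l ls ih =>
    obtain ⟨ihF, ihT⟩ := ih
    by_cases h1 : PySem.Str.strip l = ""
    · have hc : pvClassify l = (PvKind.blank, "") := by simp [pvClassify, h1]
      constructor <;>
        simp [pvGA, h1, hc, pvProcess_nonli PvKind.blank (by simp) "", pvLiC, ihF]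
    · by_cases h2 : PySem.Str.startswith (PySem.Str.strip l) "## " = true
      · simp at h2
        have hc : pvClassify l = (PvKind.h2, PySem.Str.slice (PySem.Str.strip l) (some 3) none) := by
          simp [pvClassify, h1, h2]
        constructor <;>
          simp [pvGA, h1, h2, hc, pvProcess_nonli PvKind.h2 (by simp) _, pvLiC, pvTag, ihF]
      · by_cases h3 : PySem.Str.startswith (PySem.Str.strip l) "# " = true
        · simp at h2 h3
          have hc : pvClassify l = (PvKind.h1, PySem.Str.slice (PySem.Str.strip l) (some 2) none) := by
            simp [pvClassify, h1, h2, h3]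
          constructor <;>
            simp [pvGA, h1, h2, h3, hc, pvProcess_nonli PvKind.h1 (by simp) _, pvLiC, pvTag, ihF]
        · by_cases h4 : PySem.Str.startswith (PySem.Str.strip l) "- " = true
          · simp at h2 h3 h4
            have hc : pvClassify l = (PvKind.li, PySem.Str.slice (PySem.Str.strip l) (some 2) none) := by
              simp [pvClassify, h1, h2, h3, h4]
            constructor <;>
              simp [pvGA, h1, h2, h3, h4, hc, pvProcess_li, pvLiC, pvLiTag, ihT]
          · simp at h2 h3 h4
            have hc : pvClassify l = (PvKind.p, PySem.Str.strip l) := by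
              simp [pvClassify, h1, h2, h3, h4]
            constructor <;>
              simp [pvGA, h1, h2, h3, h4, hc, pvProcess_nonli PvKind.p (by simp) _, pvLiC, pvTag, ihF]

-- ===== VERDICT (by name: the statement is the Claim_ definition above) =====
theorem format_content_as_html_spec : Claim_equal_format_content_as_html := by
  intro content _
  unfold Spec_format_content_as_html format_content_as_html format_content_as_html_alt
  have h := pvFoldA (pvSplitLines content) [] false
  simp only [List.nil_append] at h
  simp only []
  rw [h, (pvMain (pvSplitLines content)).1]
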